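-- pv_equiv track=rewrite | github.com/venkateshhs/eCRF | ecrf_backend/versions.py | _index_map_by_name
-- ===== SOURCE A (Python) =====
-- from typing import Any, Dict, List, Optional, Tuple
--
-- def _index_map_by_name(old_names: List[str], new_names: List[str]) -> Dict[int, int]:
--     """Map old index → new index by exact (case-insensitive) name match."""
--     new_lookup = {n.lower(): i for i, n in enumerate(new_names)}
--     out: Dict[int, int] = {}
--     for i, n in enumerate(old_names):
--         j = new_lookup.get(n.lower())
--         if j is not None:
--             out[i] = j
--     return out
-- ===== SOURCE B (Python) =====
-- from typing import Dict, List
--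
-- def _index_map_by_name(old_names: List[str], new_names: List[str]) -> Dict[int, int]:
--     """Map old index -> new index by exact (case-insensitive) name match."""
--     old_keys = [n.lower() for n in old_names]
--     res = [None] * len(old_names)
--     for j, m in enumerate(new_names):
--         key = m.lower()
--         res = [j if k == key else r for k, r in zip(old_keys, res)]
--     return {i: j for i, j in enumerate(res) if j is not None}
-- ===== Notes on version B (the rewrite author's own statement) =====
-- stated objective: alternative
-- what changed: B transposes the computation: instead of prebuilding a lowercase->index dict over new_names and doing one pass over old_names, it keeps a slot array indexed by old position and makes a single outer pass over new_names, writing the current new index into every slot whose lowercase old name matches (later passes overwrite, so the last occurrence wins naturally), then emits the filled slots in index order.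
import Mathlib
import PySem

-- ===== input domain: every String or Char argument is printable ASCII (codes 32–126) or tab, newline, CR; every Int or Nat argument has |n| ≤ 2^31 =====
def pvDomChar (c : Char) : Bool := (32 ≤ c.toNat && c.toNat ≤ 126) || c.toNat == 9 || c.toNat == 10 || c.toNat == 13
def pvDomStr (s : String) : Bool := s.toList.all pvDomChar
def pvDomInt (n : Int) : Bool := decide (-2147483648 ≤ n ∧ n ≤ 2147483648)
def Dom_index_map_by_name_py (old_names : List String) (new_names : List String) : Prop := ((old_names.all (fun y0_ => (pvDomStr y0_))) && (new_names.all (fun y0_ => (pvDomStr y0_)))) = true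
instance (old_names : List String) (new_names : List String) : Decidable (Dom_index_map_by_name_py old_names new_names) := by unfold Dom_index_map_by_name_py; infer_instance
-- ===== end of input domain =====

-- B transposes the computation: one outer pass over new_names writes the current new index
-- into a slot array indexed by old position (later writes overwrite, so the last occurrence
-- wins), then the filled slots are emitted in index order; no lookup dict (alternative).

-- ===== PORT A =====
def index_map_by_name_py (old_names : List String) (new_names : List String) : List (Int × Int) :=
  let new_lookup : PySem.Dict String Int :=
    (PySem.List.enumerate new_names).foldl
      (fun d p => d.insert (PySem.Str.lower p.2) p.1) PySem.Dict.empty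
  ((PySem.List.enumerate old_names).foldl
      (fun out p =>
        match new_lookup.get? (PySem.Str.lower p.2) with
        | some j => out.insert p.1 j
        | none => out)
      (PySem.Dict.empty : PySem.Dict Int Int)).items

-- ===== PORT B =====
def index_map_by_name_py_alt (old_names : List String) (new_names : List String) : List (Int × Int) :=
  let old_keys := old_names.map PySem.Str.lower
  let res := (PySem.List.enumerate new_names).foldl
    (fun res q =>
      let key := PySem.Str.lower q.2
      List.zipWith (fun k r => if k == key then some q.1 else r) old_keys res)
    (List.replicate old_names.length (none : Option Int))
  (PySem.List.enumerate res).foldl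
    (fun acc p => match p.2 with | some j => acc ++ [(p.1, j)] | none => acc) []

-- ===== PRECONDITION & SPEC =====
def Spec_index_map_by_name_py (old_names : List String) (new_names : List String) (out : List (Int × Int)) : Prop := out = index_map_by_name_py_alt old_names new_names
instance (old_names : List String) (new_names : List String) (out : List (Int × Int)) : Decidable (Spec_index_map_by_name_py old_names new_names out) := by unfold Spec_index_map_by_name_py; infer_instance

-- ===== CLAIM (what is proved, stated in full; the proofs are below) =====
def Claim_equal_index_map_by_name_py : Prop := ∀ (old_names : List String) (new_names : List String), Dom_index_map_by_name_py old_names new_names → Spec_index_map_by_name_py old_names new_names (index_map_by_name_py old_names new_names)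

-- ===== LEMMAS AND PROOFS =====

-- the last new index whose lowercase name equals k (shared characterisation of both sides)
def lastMatch (new_names : List String) (k : String) : Option Int :=
  (PySem.List.enumerate new_names).foldl
    (fun found q => if k == PySem.Str.lower q.2 then some q.1 else found) none

-- A's dict lookup = the last-match fold (generalised over the enumerate start and the dict so far)
theorem lookup_eq_lastMatch (ns : List String) (k : String) :
    ∀ (s : Int) (d : PySem.Dict String Int),
      ((PySem.List.enumerate ns s).foldl
          (fun d p => d.insert (PySem.Str.lower p.2) p.1) d).get? k
        = (PySem.List.enumerate ns s).foldl
            (fun found q => if k == PySem.Str.lower q.2 then some q.1 else found) (d.get? k) := by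
  induction ns with
  | nil => intro s d; simp [PySem.List.enumerate]
  | cons n ns ih =>
      intro s d
      rw [PySem.List.enumerate_cons]
      simp only [List.foldl_cons]
      rw [ih]
      congr 1
      rw [PySem.Dict.get?_insert]
      by_cases h : k = PySem.Str.lower n
      · simp [h]
      · simp [h]

-- B's slot array after the fold holds, per key, the last-match fold over the scanned prefix
theorem slots_eq_map_lastMatch (ks : List String) :
    ∀ (ns : List String) (s : Int) (f : String → Option Int),
      (PySem.List.enumerate ns s).foldl
          (fun res q =>
            List.zipWith (fun k r => if k == PySem.Str.lower q.2 then some q.1 else r) ks res)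
          (ks.map f)
        = ks.map (fun k =>
            (PySem.List.enumerate ns s).foldl
              (fun found q => if k == PySem.Str.lower q.2 then some q.1 else found) (f k)) := by
  intro ns
  induction ns with
  | nil => intro s f; simp [PySem.List.enumerate]
  | cons n ns ih =>
      intro s f
      rw [PySem.List.enumerate_cons]
      simp only [List.foldl_cons]
      rw [List.zipWith_map_right, List.zipWith_self, ih]

-- enumerate commutes with map on the element component
theorem enumerate_map {α β : Type} (f : α → β) (xs : List α) :
    ∀ (s : Int), PySem.List.enumerate (xs.map f) s
      = (PySem.List.enumerate xs s).map (fun p => (p.1, f p.2)) := by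
  induction xs with
  | nil => intro s; simp [PySem.List.enumerate]
  | cons x xs ih => intro s; simp [PySem.List.enumerate_cons, ih]

-- A's dict-building fold over fresh, increasing keys appends exactly the last-match pairs
theorem outer_eq (g : Int × String → Option Int) :
    ∀ (os : List String) (s : Int) (out : PySem.Dict Int Int),
      (∀ k ∈ out.keys, k < s) →
      ((PySem.List.enumerate os s).foldl
          (fun out p => match g p with | some j => out.insert p.1 j | none => out) out).items
        = (PySem.List.enumerate os s).foldl
            (fun acc p => match g p with | some j => acc ++ [(p.1, j)] | none => acc) out.items := by
  intro os
  induction os with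
  | nil => intro s out _; simp [PySem.List.enumerate]
  | cons n os ih =>
      intro s out hlt
      rw [PySem.List.enumerate_cons]
      simp only [List.foldl_cons]
      cases hg : g (s, n) with
      | none =>
          exact ih (s + 1) out (fun k hk => by have := hlt k hk; omega)
      | some j =>
          have hnc : out.contains s = false := by
            cases h : out.contains s
            · rfl
            · exfalso
              have := hlt s ((PySem.Dict.contains_iff_mem_keys out s).mp h); omega
          have hitems := PySem.Dict.items_insert_of_not_contains (d := out) (k := s) (v := j) hnc
          rw [ih (s + 1) (out.insert s j) (fun k hk => by
            rcases (PySem.Dict.mem_keys_insert _ _ _ _).mp hk with h | h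
            · omega
            · have := hlt k h; omega), hitems]

-- ===== VERDICT (by name: the statement is the Claim_ definition above) =====
theorem index_map_by_name_py_spec : Claim_equal_index_map_by_name_py := by
  intro old_names new_names _
  unfold Spec_index_map_by_name_py
  simp only [index_map_by_name_py, index_map_by_name_py_alt]
  -- rewrite B: the slot array is a map of lastMatch over the lowercase old keys
  have hrep : List.replicate old_names.length (none : Option Int)
      = (old_names.map PySem.Str.lower).map (fun _ => (none : Option Int)) := by
    rw [List.map_const', List.length_map]
  rw [hrep, slots_eq_map_lastMatch, List.map_map, enumerate_map, List.foldl_map]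
  -- rewrite A: the dict lookup is lastMatch, the dict fold appends the matched pairs
  have hlook : ∀ p : Int × String,
      ((PySem.List.enumerate new_names 0).foldl
          (fun d p => d.insert (PySem.Str.lower p.2) p.1) PySem.Dict.empty).get?
        (PySem.Str.lower p.2)
        = lastMatch new_names (PySem.Str.lower p.2) := by
    intro p
    rw [lookup_eq_lastMatch]
    simp [lastMatch, PySem.Dict.get?_empty]
  simp only [hlook]
  have := outer_eq
      (fun p => lastMatch new_names (PySem.Str.lower p.2))
      old_names 0 (PySem.Dict.empty : PySem.Dict Int Int)
      (by simp [PySem.Dict.keys_empty])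
  rw [this, show (PySem.Dict.empty : PySem.Dict Int Int).items = [] from rfl]
  simp [lastMatch, Function.comp]
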